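-- pv_equiv track=rewrite | github.com/ethancpeterson5/472Project2 | stateHelpers.py | checkIfMoveCaptures
-- ===== SOURCE A (Python) =====
-- def checkIfMoveCaptures(currentBoard, i, j, move):
--     captured = False
--     if move == 'L':
--         oppositeMove = 'R'
--     else:
--         oppositeMove = 'L'
--     for changeInI in range(-1,2):
--         for changeInJ in range(-1,2):
--             if changeInI == 0 and changeInJ == 0:
--                 continue
--             row = i + changeInI
--             col = j + changeInJ
--             while 0 <= row < 8 and 0 <= col < 8 and currentBoard[row][col] != '_':
--                 if currentBoard[row][col] == move:
--                     captured = True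
--                     break
--                 row += changeInI
--                 col += changeInJ
--             if captured:
--                 return True
--
--     return False
-- ===== SOURCE B (Python) =====
-- def _cell(board, r, c):
--     return board[r][c] if 0 <= r < 8 and 0 <= c < 8 else '_'
--
--
-- def checkIfMoveCaptures(currentBoard, i, j, move):
--     # Different strategy: instead of walking the 8 rays outward from (i, j),
--     # scan the board once for pieces equal to `move` and test line-of-sight:
--     # such a piece captures iff it is aligned with (i, j) (row, column or
--     # diagonal) and every cell strictly between is a non-empty board cell.
--     if move == '_':
--         return False
--     targets = [(r, c) for r, row in enumerate(currentBoard[:8])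
--                       for c, v in enumerate(row[:8]) if v == move]
--     for (r, c) in targets:
--         dr, dc = r - i, c - j
--         if (dr, dc) == (0, 0) or not (dr == 0 or dc == 0 or abs(dr) == abs(dc)):
--             continue
--         sr = (dr > 0) - (dr < 0)
--         sc = (dc > 0) - (dc < 0)
--         if all(_cell(currentBoard, i + m * sr, j + m * sc) != '_'
--                for m in range(1, max(abs(dr), abs(dc)))):
--             return True
--     return False
-- ===== Notes on version B (the rewrite author's own statement) =====
-- stated objective: alternative
-- what changed: Instead of A's flag-driven nested loop walking the 8 rays outward from (i,j), B scans the clipped 8x8 board once for the positions holding `move` and tests each for line-of-sight back to (i,j): alignment on a row/column/diagonal plus every strictly-between cell non-empty; the unused oppositeMove computation is dropped.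
-- outside the precondition, e.g. on checkIfMoveCaptures([['_', 'L'], ['L']], 2, 1, 'L'): A returns True, B raises IndexError; on checkIfMoveCaptures([['_', '_'], ['_', '_']], 0, 0, 'L'): A returns False, B returns False
import Mathlib
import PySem

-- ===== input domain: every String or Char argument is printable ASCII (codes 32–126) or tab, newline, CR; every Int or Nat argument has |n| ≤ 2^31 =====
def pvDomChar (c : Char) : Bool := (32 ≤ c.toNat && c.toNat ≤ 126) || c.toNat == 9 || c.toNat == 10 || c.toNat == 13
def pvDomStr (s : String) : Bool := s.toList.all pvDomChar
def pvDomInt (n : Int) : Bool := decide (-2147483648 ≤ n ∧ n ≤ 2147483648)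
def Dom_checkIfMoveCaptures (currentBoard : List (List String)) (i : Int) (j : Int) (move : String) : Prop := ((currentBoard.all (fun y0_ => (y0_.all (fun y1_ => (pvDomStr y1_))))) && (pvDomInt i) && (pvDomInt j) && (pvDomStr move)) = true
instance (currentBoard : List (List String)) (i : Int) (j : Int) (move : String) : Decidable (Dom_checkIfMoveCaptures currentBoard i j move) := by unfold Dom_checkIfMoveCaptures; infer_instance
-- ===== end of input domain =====

-- B replaces A's 8-ray outward walk from (i,j) by a one-pass scan for the pieces equal to
-- `move` followed by a line-of-sight test back towards (i,j) (objective: alternative).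
-- Equivalence is proved on Pre_ (full 8x8 window present, or (i,j) too far to touch a cell).

-- ===== PORT A =====
-- shared board accessor: out-of-real-bounds indexing returns a default; such inputs are
-- outside Pre_ (Python A raises there)
def pvCellAt (currentBoard : List (List String)) (row col : Int) : String :=
  (PySem.List.pyGet? ((PySem.List.pyGet? currentBoard row).getD []) col).getD "_"

-- the while loop of A for one direction; fuel 9 suffices: each step moves by (di,dj) ≠ (0,0),
-- so at most 8 in-range iterations happen (guards that make the loop total)
def aWalk (currentBoard : List (List String)) (move : String) (row col di dj : Int) : Nat → Bool
  | 0 => false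
  | fuel + 1 =>
    if 0 ≤ row ∧ row < 8 ∧ 0 ≤ col ∧ col < 8 ∧ pvCellAt currentBoard row col ≠ "_" then
      if pvCellAt currentBoard row col = move then true
      else aWalk currentBoard move (row + di) (col + dj) di dj fuel
    else false

def aInner (currentBoard : List (List String)) (i j : Int) (move : String) (di : Int) : List Int → Bool
  | [] => false
  | dj :: rest =>
    if di = 0 ∧ dj = 0 then aInner currentBoard i j move di rest
    else if aWalk currentBoard move (i + di) (j + dj) di dj 9 then true
    else aInner currentBoard i j move di rest

def aOuter (currentBoard : List (List String)) (i j : Int) (move : String) : List Int → Bool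
  | [] => false
  | di :: rest =>
    if aInner currentBoard i j move di (PySem.List.pyRange (-1) 2 1) then true
    else aOuter currentBoard i j move rest

def checkIfMoveCaptures (currentBoard : List (List String)) (i : Int) (j : Int) (move : String) : Bool :=
  let _oppositeMove := if move = "L" then "R" else "L"  -- computed but unused in A
  aOuter currentBoard i j move (PySem.List.pyRange (-1) 2 1)

-- ===== PORT B =====
-- _cell: board value at (r, c) inside the 8x8 window, '_' outside it
def bCell (currentBoard : List (List String)) (r c : Int) : String :=
  if 0 ≤ r ∧ r < 8 ∧ 0 ≤ c ∧ c < 8 then pvCellAt currentBoard r c else "_"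

-- the targets comprehension: positions (within the clipped 8x8 window) holding `move`
def bTargets (currentBoard : List (List String)) (move : String) : List (Int × Int) :=
  (PySem.List.enumerate (PySem.List.slice currentBoard none (some 8)) 0).flatMap fun rrow =>
    (PySem.List.enumerate (PySem.List.slice rrow.2 none (some 8)) 0).filterMap fun cv =>
      if cv.2 = move then some (rrow.1, cv.1) else none

-- the all(...) generator: cells strictly between, stepping from (r, c) by (sr, sc)
def clearPath (currentBoard : List (List String)) (r c sr sc : Int) : Nat → Bool
  | 0 => true
  | fuel + 1 =>
    if bCell currentBoard (r + sr) (c + sc) = "_" then false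
    else clearPath currentBoard (r + sr) (c + sc) sr sc fuel

-- (dr > 0) - (dr < 0)
def pySign (x : Int) : Int := (if 0 < x then 1 else 0) - (if x < 0 then 1 else 0)

def checkIfMoveCaptures_alt (currentBoard : List (List String)) (i : Int) (j : Int) (move : String) : Bool :=
  if move = "_" then false
  else
    (bTargets currentBoard move).any fun rc =>
      let dr := rc.1 - i
      let dc := rc.2 - j
      if (dr = 0 ∧ dc = 0) ∨ ¬(dr = 0 ∨ dc = 0 ∨ dr.natAbs = dc.natAbs) then false
      else clearPath currentBoard i j (pySign dr) (pySign dc) (max dr.natAbs dc.natAbs - 1)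

-- ===== PRECONDITION & SPEC =====
-- Pre_ excludes ragged or short boards (unless (i,j) is so far out that no cell is ever read,
-- which both versions handle): on those, A's direct indexing can raise IndexError, and where A
-- happens to return, B's window-guarded cell reads can still raise IndexError.
def Pre_checkIfMoveCaptures (currentBoard : List (List String)) (i : Int) (j : Int) (move : String) : Prop :=
  (i < -1 ∨ 8 < i ∨ j < -1 ∨ 8 < j) ∨
  (8 ≤ currentBoard.length ∧ ∀ r ∈ currentBoard.take 8, 8 ≤ r.length)

instance (currentBoard : List (List String)) (i : Int) (j : Int) (move : String) : Decidable (Pre_checkIfMoveCaptures currentBoard i j move) := by unfold Pre_checkIfMoveCaptures; infer_instance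

def pvWitness_checkIfMoveCaptures : List (List String) × Int × Int × String :=
  (List.replicate 8 (List.replicate 8 "_"), 3, 3, "L")

def Spec_checkIfMoveCaptures (currentBoard : List (List String)) (i : Int) (j : Int) (move : String) (out : Bool) : Prop := out = checkIfMoveCaptures_alt currentBoard i j move
instance (currentBoard : List (List String)) (i : Int) (j : Int) (move : String) (out : Bool) : Decidable (Spec_checkIfMoveCaptures currentBoard i j move out) := by unfold Spec_checkIfMoveCaptures; infer_instance

-- ===== CLAIM (what is proved, stated in full; the proofs are below) =====
def Claim_equal_checkIfMoveCaptures : Prop := ∀ (currentBoard : List (List String)) (i : Int) (j : Int) (move : String), Dom_checkIfMoveCaptures currentBoard i j move → Pre_checkIfMoveCaptures currentBoard i j move → Spec_checkIfMoveCaptures currentBoard i j move (checkIfMoveCaptures currentBoard i j move)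

-- ===== LEMMAS AND PROOFS =====

-- a cell A's walk may pass over: inside the window and non-empty
def passP (b : List (List String)) (r c : Int) : Prop :=
  (0 ≤ r ∧ r < 8 ∧ 0 ≤ c ∧ c < 8) ∧ pvCellAt b r c ≠ "_"

-- a cell A's walk stops at with success
def hitP (b : List (List String)) (move : String) (r c : Int) : Prop :=
  passP b r c ∧ pvCellAt b r c = move

theorem bCell_ne_iff (b : List (List String)) (r c : Int) :
    bCell b r c ≠ "_" ↔ passP b r c := by
  unfold bCell passP
  split_ifs with h <;> simp [h]

-- characterization of A's while loop: success iff some step t hits `move` with a clean prefix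
theorem walk_iff (b : List (List String)) (move : String) (di dj : Int) :
    ∀ (fuel : Nat) (row col : Int),
      aWalk b move row col di dj fuel = true ↔
        ∃ t : Nat, t < fuel ∧
          (∀ s : Nat, s < t → passP b (row + (s : Int) * di) (col + (s : Int) * dj)) ∧
          hitP b move (row + (t : Int) * di) (col + (t : Int) * dj) := by
  intro fuel
  induction fuel with
  | zero => intro row col; simp [aWalk]
  | succ n ih =>
    intro row col
    by_cases h1 : 0 ≤ row ∧ row < 8 ∧ 0 ≤ col ∧ col < 8 ∧ pvCellAt b row col ≠ "_"
    · by_cases h2 : pvCellAt b row col = move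
      · have hL : aWalk b move row col di dj (n + 1) = true := by
          simp only [aWalk]; rw [if_pos h1, if_pos h2]
        rw [hL]
        constructor
        · intro _
          refine ⟨0, by omega, fun s hs => absurd hs (by omega), ?_⟩
          simpa using (⟨⟨⟨h1.1, h1.2.1, h1.2.2.1, h1.2.2.2.1⟩, h1.2.2.2.2⟩, h2⟩ :
            hitP b move row col)
        · intro _; rfl
      · have hL : aWalk b move row col di dj (n + 1) = aWalk b move (row + di) (col + dj) di dj n := by
          simp only [aWalk]; rw [if_pos h1, if_neg h2]
        rw [hL, ih]
        constructor
        · rintro ⟨t, ht, hc, hh⟩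
          refine ⟨t + 1, by omega, ?_, ?_⟩
          · intro s hs
            cases s with
            | zero =>
              simpa using (⟨⟨h1.1, h1.2.1, h1.2.2.1, h1.2.2.2.1⟩, h1.2.2.2.2⟩ : passP b row col)
            | succ s' =>
              have hps := hc s' (by omega)
              have e1 : row + ((s' + 1 : Nat) : Int) * di = row + di + (s' : Int) * di := by
                push_cast; ring
              have e2 : col + ((s' + 1 : Nat) : Int) * dj = col + dj + (s' : Int) * dj := by
                push_cast; ring
              rw [e1, e2]; exact hps
          · have e1 : row + ((t + 1 : Nat) : Int) * di = row + di + (t : Int) * di := by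
              push_cast; ring
            have e2 : col + ((t + 1 : Nat) : Int) * dj = col + dj + (t : Int) * dj := by
              push_cast; ring
            rw [e1, e2]; exact hh
        · rintro ⟨t, ht, hc, hh⟩
          cases t with
          | zero => exact absurd (by simpa using hh.2) h2
          | succ t' =>
            refine ⟨t', by omega, ?_, ?_⟩
            · intro s hs
              have hps := hc (s + 1) (by omega)
              have e1 : row + ((s + 1 : Nat) : Int) * di = row + di + (s : Int) * di := by
                push_cast; ring
              have e2 : col + ((s + 1 : Nat) : Int) * dj = col + dj + (s : Int) * dj := by
                push_cast; ring
              rw [e1, e2] at hps; exact hps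
            · have e1 : row + ((t' + 1 : Nat) : Int) * di = row + di + (t' : Int) * di := by
                push_cast; ring
              have e2 : col + ((t' + 1 : Nat) : Int) * dj = col + dj + (t' : Int) * dj := by
                push_cast; ring
              rw [e1, e2] at hh; exact hh
    · have hL : aWalk b move row col di dj (n + 1) = false := by
        simp only [aWalk]; rw [if_neg h1]
      rw [hL]
      simp only [Bool.false_eq_true, false_iff]
      rintro ⟨t, ht, hc, hh⟩
      cases t with
      | zero =>
        have hp : passP b row col := by simpa using hh.1
        exact h1 ⟨hp.1.1, hp.1.2.1, hp.1.2.2.1, hp.1.2.2.2, hp.2⟩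
      | succ t' =>
        have hp : passP b row col := by simpa using hc 0 (by omega)
        exact h1 ⟨hp.1.1, hp.1.2.1, hp.1.2.2.1, hp.1.2.2.2, hp.2⟩

-- characterization of B's all(...) generator
theorem clear_iff (b : List (List String)) (sr sc : Int) :
    ∀ (fuel : Nat) (r c : Int),
      clearPath b r c sr sc fuel = true ↔
        ∀ m : Nat, m < fuel → bCell b (r + ((m : Int) + 1) * sr) (c + ((m : Int) + 1) * sc) ≠ "_" := by
  intro fuel
  induction fuel with
  | zero => intro r c; simp [clearPath]
  | succ n ih =>
    intro r c
    by_cases h0 : bCell b (r + sr) (c + sc) = "_"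
    · have hL : clearPath b r c sr sc (n + 1) = false := by simp [clearPath, h0]
      rw [hL]
      simp only [Bool.false_eq_true, false_iff]
      intro h
      have := h 0 (by omega)
      simp only [Nat.cast_zero, zero_add, one_mul] at this
      exact this h0
    · have hL : clearPath b r c sr sc (n + 1) = clearPath b (r + sr) (c + sc) sr sc n := by
        simp [clearPath, h0]
      rw [hL, ih]
      constructor
      · intro h m hm
        cases m with
        | zero => simpa using h0
        | succ m' =>
          have hmm := h m' (by omega)
          have e1 : r + (((m' + 1 : Nat) : Int) + 1) * sr = r + sr + ((m' : Int) + 1) * sr := by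
            push_cast; ring
          have e2 : c + (((m' + 1 : Nat) : Int) + 1) * sc = c + sc + ((m' : Int) + 1) * sc := by
            push_cast; ring
          rw [e1, e2]; exact hmm
      · intro h m hm
        have hmm := h (m + 1) (by omega)
        have e1 : r + (((m + 1 : Nat) : Int) + 1) * sr = r + sr + ((m : Int) + 1) * sr := by
          push_cast; ring
        have e2 : c + (((m + 1 : Nat) : Int) + 1) * sc = c + sc + ((m : Int) + 1) * sc := by
          push_cast; ring
        rw [e1, e2] at hmm; exact hmm

-- membership in enumerate
theorem mem_enum {α : Type} : ∀ (xs : List α) (s : Int) (p : Int × α),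
    p ∈ PySem.List.enumerate xs s ↔ ∃ n : Nat, n < xs.length ∧ p.1 = s + n ∧ xs[n]? = some p.2 := by
  intro xs
  induction xs with
  | nil => intro s p; simp [PySem.List.enumerate_nil]
  | cons x xs ih =>
    intro s p
    rw [PySem.List.enumerate_cons]
    simp only [List.mem_cons, ih]
    constructor
    · rintro (rfl | ⟨n, hn, hp, hg⟩)
      · exact ⟨0, by simp, by simp, by simp⟩
      · refine ⟨n + 1, by simpa using hn, ?_, by simpa using hg⟩
        push_cast at hp ⊢; omega
    · rintro ⟨n, hn, hp, hg⟩
      cases n with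
      | zero =>
        left
        obtain ⟨p1, p2⟩ := p
        simp only [List.getElem?_cons_zero, Option.some.injEq] at hg
        simp only [Nat.cast_zero, add_zero] at hp
        simp [hp, hg]
      | succ n' =>
        right
        refine ⟨n', by simpa using hn, ?_, by simpa using hg⟩
        push_cast at hp ⊢; omega

-- membership in the targets comprehension, on any board
theorem mem_bTargets (b : List (List String)) (move : String) (r c : Int) :
    (r, c) ∈ bTargets b move ↔
      ∃ rn cn : Nat, r = rn ∧ c = cn ∧
        ∃ row, (b.take 8)[rn]? = some row ∧ (row.take 8)[cn]? = some move := by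
  have hsl : ∀ {α : Type} (xs : List α), PySem.List.slice xs none (some (8 : Int)) = xs.take 8 := by
    intro α xs
    rw [PySem.List.slice_to _ (show (0 : Int) ≤ 8 by norm_num)]
    rfl
  constructor
  · intro h
    unfold bTargets at h
    simp only [hsl] at h
    rw [List.mem_flatMap] at h
    obtain ⟨rrow, hr, hc⟩ := h
    rw [List.mem_filterMap] at hc
    obtain ⟨cv, hcv, hf⟩ := hc
    rw [mem_enum] at hr hcv
    obtain ⟨rn, hrn, hr1, hr2⟩ := hr
    obtain ⟨cn, hcn, hc1, hc2⟩ := hcv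
    by_cases hm : cv.2 = move
    · rw [if_pos hm] at hf
      obtain ⟨he1, he2⟩ := Prod.mk.injEq .. ▸ Option.some.injEq .. ▸ hf
      refine ⟨rn, cn, ?_, ?_, rrow.2, hr2, ?_⟩
      · omega
      · omega
      · rw [hc2, hm]
    · rw [if_neg hm] at hf; exact absurd hf (by simp)
  · rintro ⟨rn, cn, rfl, rfl, row, hrow, hcell⟩
    unfold bTargets
    simp only [hsl]
    rw [List.mem_flatMap]
    refine ⟨((rn : Int), row), ?_, ?_⟩
    · rw [mem_enum]
      exact ⟨rn, by simpa using (List.getElem?_eq_some_iff.mp hrow).1, by simp, hrow⟩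
    · rw [List.mem_filterMap]
      refine ⟨((cn : Int), move), ?_, by simp⟩
      rw [mem_enum]
      exact ⟨cn, by simpa using (List.getElem?_eq_some_iff.mp hcell).1, by simp, hcell⟩

-- every target lies in the 8x8 window (any board)
theorem targets_bounds (b : List (List String)) (move : String) (r c : Int)
    (h : (r, c) ∈ bTargets b move) : 0 ≤ r ∧ r < 8 ∧ 0 ≤ c ∧ c < 8 := by
  rw [mem_bTargets] at h
  obtain ⟨rn, cn, rfl, rfl, row, hrow, hcell⟩ := h
  have h1 : rn < (b.take 8).length := (List.getElem?_eq_some_iff.mp hrow).1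
  have h2 : cn < (row.take 8).length := (List.getElem?_eq_some_iff.mp hcell).1
  have h1' : (b.take 8).length ≤ 8 := by simp
  have h2' : (row.take 8).length ≤ 8 := by simp
  constructor
  · positivity
  refine ⟨by exact_mod_cast by omega, by positivity, by exact_mod_cast by omega⟩

-- on a full-window board, targets are exactly the window cells holding `move`
theorem targets_mem (b : List (List String)) (move : String)
    (hb : 8 ≤ b.length ∧ ∀ r ∈ b.take 8, 8 ≤ r.length) (r c : Int) :
    (r, c) ∈ bTargets b move ↔
      (0 ≤ r ∧ r < 8 ∧ 0 ≤ c ∧ c < 8) ∧ pvCellAt b r c = move := by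
  obtain ⟨hlen, hrows⟩ := hb
  rw [mem_bTargets]
  constructor
  · rintro ⟨rn, cn, rfl, rfl, row, hrow, hcell⟩
    have h1 : rn < (b.take 8).length := (List.getElem?_eq_some_iff.mp hrow).1
    have h1' : rn < 8 := by
      have := List.length_take_le 8 b; omega
    have h2 : cn < (row.take 8).length := (List.getElem?_eq_some_iff.mp hcell).1
    have h2' : cn < 8 := by
      have := List.length_take_le 8 row; omega
    have hrn : rn < b.length := by omega
    have hroweq : row = b[rn] := by
      rw [List.getElem?_take_of_lt h1', List.getElem?_eq_getElem hrn] at hrow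
      exact (Option.some.injEq .. ▸ hrow).symm
    have hcn : cn < row.length := by
      have hmem : row ∈ b.take 8 := List.mem_of_getElem? hrow
      have := hrows row hmem; omega
    have hcn' : cn < b[rn].length := hroweq ▸ hcn
    have hcelleq : b[rn][cn] = move := by
      rw [List.getElem?_take_of_lt h2', hroweq, List.getElem?_eq_getElem hcn'] at hcell
      exact Option.some.injEq .. ▸ hcell
    refine ⟨⟨by positivity, by exact_mod_cast h1', by positivity, by exact_mod_cast h2'⟩, ?_⟩
    unfold pvCellAt
    simp only [PySem.List.pyGet?_natCast]
    rw [List.getElem?_eq_getElem hrn]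
    simp only [Option.getD_some]
    rw [List.getElem?_eq_getElem hcn']
    simp only [Option.getD_some]
    exact hcelleq
  · rintro ⟨⟨h0r, h8r, h0c, h8c⟩, hcell⟩
    refine ⟨r.toNat, c.toNat, by omega, by omega, ?_⟩
    have hrn : r.toNat < 8 := by omega
    have hcn8 : c.toNat < 8 := by omega
    have hrlen : r.toNat < b.length := by omega
    have hrowmem : b[r.toNat] ∈ b.take 8 := by
      exact List.mem_of_getElem? (i := r.toNat) (by
        rw [List.getElem?_take_of_lt hrn, List.getElem?_eq_getElem hrlen])
    have hclen : c.toNat < b[r.toNat].length := by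
      have := hrows _ hrowmem; omega
    refine ⟨b[r.toNat], ?_, ?_⟩
    · rw [List.getElem?_take_of_lt hrn, List.getElem?_eq_getElem hrlen]
    · rw [List.getElem?_take_of_lt hcn8, List.getElem?_eq_getElem hclen]
      congr 1
      unfold pvCellAt at hcell
      rw [show r = ((r.toNat : Nat) : Int) by omega, show c = ((c.toNat : Nat) : Int) by omega] at hcell
      simp only [PySem.List.pyGet?_natCast] at hcell
      rw [List.getElem?_eq_getElem hrlen] at hcell
      simp only [Option.getD_some] at hcell
      rw [List.getElem?_eq_getElem hclen] at hcell
      simpa using hcell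

theorem sign_mul_natAbs (x : Int) : (x.natAbs : Int) * pySign x = x := by
  unfold pySign; split_ifs <;> omega

theorem pySign_cases (x : Int) : pySign x = -1 ∨ pySign x = 0 ∨ pySign x = 1 := by
  unfold pySign; split_ifs <;> omega

theorem pySign_eq_zero (x : Int) : pySign x = 0 ↔ x = 0 := by
  unfold pySign; split_ifs <;> omega

theorem pyRange_m1_2 : PySem.List.pyRange (-1) 2 1 = [-1, 0, 1] := by decide

-- A's result as the disjunction over the 8 rays
theorem A_iff (b : List (List String)) (i j : Int) (move : String) :
    checkIfMoveCaptures b i j move = true ↔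
      aWalk b move (i + -1) (j + -1) (-1) (-1) 9 = true ∨
      aWalk b move (i + -1) (j + 0) (-1) 0 9 = true ∨
      aWalk b move (i + -1) (j + 1) (-1) 1 9 = true ∨
      aWalk b move (i + 0) (j + -1) 0 (-1) 9 = true ∨
      aWalk b move (i + 0) (j + 1) 0 1 9 = true ∨
      aWalk b move (i + 1) (j + -1) 1 (-1) 9 = true ∨
      aWalk b move (i + 1) (j + 0) 1 0 9 = true ∨
      aWalk b move (i + 1) (j + 1) 1 1 9 = true := by
  rcases h1 : aWalk b move (i + -1) (j + -1) (-1) (-1) 9 <;>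
  rcases h2 : aWalk b move (i + -1) (j + 0) (-1) 0 9 <;>
  rcases h3 : aWalk b move (i + -1) (j + 1) (-1) 1 9 <;>
  rcases h4 : aWalk b move (i + 0) (j + -1) 0 (-1) 9 <;>
  rcases h5 : aWalk b move (i + 0) (j + 1) 0 1 9 <;>
  rcases h6 : aWalk b move (i + 1) (j + -1) 1 (-1) 9 <;>
  rcases h7 : aWalk b move (i + 1) (j + 0) 1 0 9 <;>
  rcases h8 : aWalk b move (i + 1) (j + 1) 1 1 9 <;>
  simp_all [checkIfMoveCaptures, aOuter, aInner, pyRange_m1_2]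

-- B's result characterized
theorem B_iff (b : List (List String)) (i j : Int) (move : String) :
    checkIfMoveCaptures_alt b i j move = true ↔
      move ≠ "_" ∧ ∃ r c : Int, (r, c) ∈ bTargets b move ∧
        ¬((r - i = 0 ∧ c - j = 0) ∨ ¬(r - i = 0 ∨ c - j = 0 ∨ (r - i).natAbs = (c - j).natAbs)) ∧
        clearPath b i j (pySign (r - i)) (pySign (c - j)) (max (r - i).natAbs (c - j).natAbs - 1) = true := by
  unfold checkIfMoveCaptures_alt
  by_cases hm : move = "_"
  · simp [hm]
  · rw [if_neg hm, List.any_eq_true]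
    constructor
    · rintro ⟨⟨r, c⟩, hmem, hcond⟩
      simp only at hcond
      by_cases hbad : ((r - i = 0 ∧ c - j = 0) ∨ ¬(r - i = 0 ∨ c - j = 0 ∨ (r - i).natAbs = (c - j).natAbs))
      · rw [if_pos hbad] at hcond; exact absurd hcond (by simp)
      · rw [if_neg hbad] at hcond
        exact ⟨hm, r, c, hmem, hbad, hcond⟩
    · rintro ⟨_, r, c, hmem, hbad, hclear⟩
      refine ⟨(r, c), hmem, ?_⟩
      simp only
      rw [if_neg hbad]
      exact hclear

-- -1 ≤ pySign x ≤ 1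
theorem pySign_bounds (x : Int) : -1 ≤ pySign x ∧ pySign x ≤ 1 := by
  unfold pySign; split_ifs <;> omega

-- far (i, j): A's walk in any of the 8 directions fails at its first bounds check
theorem walk_far (b : List (List String)) (move : String) (i j di dj : Int)
    (hdi : -1 ≤ di ∧ di ≤ 1) (hdj : -1 ≤ dj ∧ dj ≤ 1)
    (hfar : i < -1 ∨ 8 < i ∨ j < -1 ∨ 8 < j) :
    aWalk b move (i + di) (j + dj) di dj 9 = false := by
  rw [← Bool.not_eq_true, walk_iff]
  rintro ⟨t, ht, hchain, hhit⟩
  have hp : passP b (i + di) (j + dj) := by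
    cases t with
    | zero => simpa using hhit.1
    | succ t' => simpa using hchain 0 (by omega)
  have := hp.1
  omega

-- a successful walk of A, turned into a successful target of B (full-window board)
theorem ray_to_B (b : List (List String)) (i j : Int) (move : String)
    (hb : 8 ≤ b.length ∧ ∀ r ∈ b.take 8, 8 ≤ r.length) (di dj : Int)
    (hdi : di = -1 ∨ di = 0 ∨ di = 1) (hdj : dj = -1 ∨ dj = 0 ∨ dj = 1)
    (hnz : ¬(di = 0 ∧ dj = 0))
    (h : aWalk b move (i + di) (j + dj) di dj 9 = true) :
    move ≠ "_" ∧ ∃ r c : Int, (r, c) ∈ bTargets b move ∧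
      ¬((r - i = 0 ∧ c - j = 0) ∨ ¬(r - i = 0 ∨ c - j = 0 ∨ (r - i).natAbs = (c - j).natAbs)) ∧
      clearPath b i j (pySign (r - i)) (pySign (c - j)) (max (r - i).natAbs (c - j).natAbs - 1) = true := by
  rw [walk_iff] at h
  obtain ⟨t, ht, hchain, hhit⟩ := h
  set r : Int := i + di + (t : Int) * di with hr
  set c : Int := j + dj + (t : Int) * dj with hc
  obtain ⟨⟨hwin, hne⟩, hmv⟩ := hhit
  have hmu : move ≠ "_" := by rw [← hmv]; exact hne
  have hdr : r - i = ((t : Int) + 1) * di := by rw [hr]; ring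
  have hdc : c - j = ((t : Int) + 1) * dj := by rw [hc]; ring
  have hcast : ((t : Int) + 1).natAbs = t + 1 := by omega
  have hnadr : (r - i).natAbs = (t + 1) * di.natAbs := by
    rw [hdr, Int.natAbs_mul, hcast]
  have hnadc : (c - j).natAbs = (t + 1) * dj.natAbs := by
    rw [hdc, Int.natAbs_mul, hcast]
  have hsr : pySign (r - i) = di := by
    have hx := hdr
    unfold pySign
    rcases hdi with rfl | rfl | rfl <;> split_ifs <;> omega
  have hsc : pySign (c - j) = dj := by
    have hx := hdc
    unfold pySign
    rcases hdj with rfl | rfl | rfl <;> split_ifs <;> omega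
  have hmax : max (r - i).natAbs (c - j).natAbs = t + 1 := by
    have h1 : di.natAbs = 0 ∨ di.natAbs = 1 := by
      rcases hdi with rfl | rfl | rfl <;> simp
    have h2 : dj.natAbs = 0 ∨ dj.natAbs = 1 := by
      rcases hdj with rfl | rfl | rfl <;> simp
    have h3 : ¬(di.natAbs = 0 ∧ dj.natAbs = 0) := by
      rintro ⟨ha, hb'⟩; exact hnz ⟨by omega, by omega⟩
    rcases h1 with h1 | h1 <;> rcases h2 with h2 | h2 <;>
      rw [h1] at hnadr <;> rw [h2] at hnadc <;> omega
  refine ⟨hmu, r, c, ?_, ?_, ?_⟩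
  · exact (targets_mem b move hb r c).mpr ⟨hwin, hmv⟩
  · intro hcontra
    rcases hcontra with ⟨h1, h2⟩ | h1
    · rw [hdr] at h1; rw [hdc] at h2
      exact hnz ⟨by omega, by omega⟩
    · apply h1
      rcases hdi with rfl | rfl | rfl
      · rcases hdj with rfl | rfl | rfl
        · right; right; omega
        · right; left; omega
        · right; right; omega
      · left; omega
      · rcases hdj with rfl | rfl | rfl
        · right; right; omega
        · right; left; omega
        · right; right; omega
  · rw [hsr, hsc, hmax, clear_iff]
    intro m hm
    have hps := hchain m (by omega)
    rw [bCell_ne_iff]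
    have e1 : i + ((m : Int) + 1) * di = i + di + (m : Int) * di := by ring
    have e2 : j + ((m : Int) + 1) * dj = j + dj + (m : Int) * dj := by ring
    rw [e1, e2]
    exact hps

-- a successful target of B, turned into a successful walk of A (full-window board)
theorem B_to_ray (b : List (List String)) (i j : Int) (move : String)
    (hb : 8 ≤ b.length ∧ ∀ r ∈ b.take 8, 8 ≤ r.length)
    (hm : move ≠ "_") (r c : Int) (hmem : (r, c) ∈ bTargets b move)
    (hbad : ¬((r - i = 0 ∧ c - j = 0) ∨ ¬(r - i = 0 ∨ c - j = 0 ∨ (r - i).natAbs = (c - j).natAbs)))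
    (hclear : clearPath b i j (pySign (r - i)) (pySign (c - j)) (max (r - i).natAbs (c - j).natAbs - 1) = true) :
    ∃ di dj : Int, (di = -1 ∨ di = 0 ∨ di = 1) ∧ (dj = -1 ∨ dj = 0 ∨ dj = 1) ∧
      ¬(di = 0 ∧ dj = 0) ∧ aWalk b move (i + di) (j + dj) di dj 9 = true := by
  have hnz0 : ¬(r - i = 0 ∧ c - j = 0) := fun h => hbad (Or.inl h)
  have halign : r - i = 0 ∨ c - j = 0 ∨ (r - i).natAbs = (c - j).natAbs := by
    by_contra hcon; exact hbad (Or.inr hcon)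
  obtain ⟨hwin, hcell⟩ := (targets_mem b move hb r c).mp hmem
  set dr : Int := r - i with hdr
  set dc : Int := c - j with hdc
  set k : Nat := max dr.natAbs dc.natAbs with hk
  have hk1 : 1 ≤ k := by
    by_contra hcon
    exact hnz0 ⟨by omega, by omega⟩
  have hkr : (k : Int) * pySign dr = dr := by
    by_cases h0 : dr = 0
    · rw [(pySign_eq_zero dr).mpr h0, h0]; ring
    · have hkdr : k = dr.natAbs := by
        rcases halign with h | h | h
        · exact absurd h h0
        · omega
        · omega
      rw [hkdr]; exact sign_mul_natAbs dr
  have hkc : (k : Int) * pySign dc = dc := by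
    by_cases h0 : dc = 0
    · rw [(pySign_eq_zero dc).mpr h0, h0]; ring
    · have hkdc : k = dc.natAbs := by
        rcases halign with h | h | h
        · omega
        · exact absurd h h0
        · omega
      rw [hkdc]; exact sign_mul_natAbs dc
  have hsb1 := pySign_bounds dr
  have hsb2 := pySign_bounds dc
  have hsz : ¬(pySign dr = 0 ∧ pySign dc = 0) := by
    rintro ⟨h1', h2'⟩
    exact hnz0 ⟨(pySign_eq_zero dr).mp h1', (pySign_eq_zero dc).mp h2'⟩
  -- k ≤ 8 from the window bounds of the first step and the hit
  have hk8 : k ≤ 8 := by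
    rcases Nat.lt_or_ge k 2 with h2 | h2
    · omega
    · have hp1 : passP b (i + pySign dr) (j + pySign dc) := by
        have := (clear_iff b (pySign dr) (pySign dc) (k - 1) i j).mp hclear 0 (by omega)
        rw [bCell_ne_iff] at this
        simpa using this
      have hb1 := hp1.1
      have hrw : r = i + (k : Int) * pySign dr := by omega
      have hcw : c = j + (k : Int) * pySign dc := by omega
      rcases pySign_cases dr with h1' | h1' | h1' <;>
        rcases pySign_cases dc with h2' | h2' | h2' <;>
          rw [h1'] at hb1 hrw <;> rw [h2'] at hb1 hcw <;> omega
  refine ⟨pySign dr, pySign dc, by omega, by omega, hsz, ?_⟩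
  rw [walk_iff]
  refine ⟨k - 1, by omega, ?_, ?_⟩
  · intro s hs
    have := (clear_iff b (pySign dr) (pySign dc) (k - 1) i j).mp hclear s (by omega)
    rw [bCell_ne_iff] at this
    have e1 : i + pySign dr + (s : Int) * pySign dr = i + ((s : Int) + 1) * pySign dr := by ring
    have e2 : j + pySign dc + (s : Int) * pySign dc = j + ((s : Int) + 1) * pySign dc := by ring
    rw [e1, e2]
    exact this
  · have e1 : i + pySign dr + ((k - 1 : Nat) : Int) * pySign dr = i + (k : Int) * pySign dr := by
      have : ((k - 1 : Nat) : Int) = (k : Int) - 1 := by omega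
      rw [this]; ring
    have e2 : j + pySign dc + ((k - 1 : Nat) : Int) * pySign dc = j + (k : Int) * pySign dc := by
      have : ((k - 1 : Nat) : Int) = (k : Int) - 1 := by omega
      rw [this]; ring
    have hrw : i + (k : Int) * pySign dr = r := by omega
    have hcw : j + (k : Int) * pySign dc = c := by omega
    rw [e1, e2, hrw, hcw]
    exact ⟨⟨hwin, by rw [hcell]; exact hm⟩, hcell⟩

-- ===== VERDICT (by name: the statement is the Claim_ definition above) =====
theorem checkIfMoveCaptures_spec : Claim_equal_checkIfMoveCaptures := by
  intro b i j move _ hpre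
  unfold Spec_checkIfMoveCaptures
  rcases hpre with hfar | hwin
  · -- (i, j) too far away: both programs return False
    have hA : checkIfMoveCaptures b i j move = false := by
      rw [← Bool.not_eq_true, A_iff]
      rintro (h | h | h | h | h | h | h | h) <;>
        exact absurd h (by rw [walk_far b move i j _ _ (by omega) (by omega) hfar]; simp)
    have hB : checkIfMoveCaptures_alt b i j move = false := by
      rw [← Bool.not_eq_true, B_iff]
      rintro ⟨hm, r, c, hmem, hbad, hclear⟩
      have hw := targets_bounds b move r c hmem
      have hsb1 := pySign_bounds (r - i)
      have hsb2 := pySign_bounds (c - j)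
      have hk2 : 2 ≤ max (r - i).natAbs (c - j).natAbs := by omega
      have hp1 := (clear_iff b (pySign (r - i)) (pySign (c - j))
        (max (r - i).natAbs (c - j).natAbs - 1) i j).mp hclear 0 (by omega)
      rw [bCell_ne_iff] at hp1
      have hp1' : passP b (i + pySign (r - i)) (j + pySign (c - j)) := by simpa using hp1
      have := hp1'.1
      omega
    rw [hA, hB]
  · -- the full 8x8 window is present: translate between the two characterizations
    apply Bool.coe_iff_coe.mp
    rw [A_iff, B_iff]
    constructor
    · rintro (h | h | h | h | h | h | h | h)
      · exact ray_to_B b i j move hwin (-1) (-1) (by norm_num) (by norm_num) (by norm_num) h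
      · exact ray_to_B b i j move hwin (-1) 0 (by norm_num) (by norm_num) (by norm_num) h
      · exact ray_to_B b i j move hwin (-1) 1 (by norm_num) (by norm_num) (by norm_num) h
      · exact ray_to_B b i j move hwin 0 (-1) (by norm_num) (by norm_num) (by norm_num) h
      · exact ray_to_B b i j move hwin 0 1 (by norm_num) (by norm_num) (by norm_num) h
      · exact ray_to_B b i j move hwin 1 (-1) (by norm_num) (by norm_num) (by norm_num) h
      · exact ray_to_B b i j move hwin 1 0 (by norm_num) (by norm_num) (by norm_num) h
      · exact ray_to_B b i j move hwin 1 1 (by norm_num) (by norm_num) (by norm_num) h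
    · rintro ⟨hm, r, c, hmem, hbad, hclear⟩
      obtain ⟨di, dj, hdi, hdj, hnz, hwalk⟩ :=
        B_to_ray b i j move hwin hm r c hmem hbad hclear
      rcases hdi with rfl | rfl | rfl <;> rcases hdj with rfl | rfl | rfl
      · exact Or.inl hwalk
      · exact Or.inr (Or.inl hwalk)
      · exact Or.inr (Or.inr (Or.inl hwalk))
      · exact Or.inr (Or.inr (Or.inr (Or.inl hwalk)))
      · exact absurd ⟨rfl, rfl⟩ hnz
      · exact Or.inr (Or.inr (Or.inr (Or.inr (Or.inl hwalk))))
      · exact Or.inr (Or.inr (Or.inr (Or.inr (Or.inr (Or.inl hwalk)))))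
      · exact Or.inr (Or.inr (Or.inr (Or.inr (Or.inr (Or.inr (Or.inl hwalk))))))
      · exact Or.inr (Or.inr (Or.inr (Or.inr (Or.inr (Or.inr (Or.inr hwalk))))))
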